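-- pv_equiv track=rewrite | github.com/selincos/advent-of-code | 2015/Day05/solution.py | hasAtLeastThreeVowels
-- ===== SOURCE A (Python) =====
-- def hasAtLeastThreeVowels(text):
--     vowel_count = 0
--     for c in text:
--         if c == 'a':
--             vowel_count += 1
--         elif c == 'e':
--             vowel_count += 1
--         elif c == 'i':
--             vowel_count += 1
--         elif c == 'o':
--             vowel_count += 1
--         elif c == 'u':
--             vowel_count += 1
--
--         if vowel_count >= 3:
--             return True
--
--     return False
-- ===== SOURCE B (Python) =====
-- def hasAtLeastThreeVowels(text):
--     return sum(text.count(v) for v in "aeiou") >= 3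
-- ===== Notes on version B (the rewrite author's own statement) =====
-- stated objective: simpler
-- what changed: Replaces the character-by-character loop with a running counter and early return by summing text.count(v) over the five vowels and comparing to 3.
import Mathlib
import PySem

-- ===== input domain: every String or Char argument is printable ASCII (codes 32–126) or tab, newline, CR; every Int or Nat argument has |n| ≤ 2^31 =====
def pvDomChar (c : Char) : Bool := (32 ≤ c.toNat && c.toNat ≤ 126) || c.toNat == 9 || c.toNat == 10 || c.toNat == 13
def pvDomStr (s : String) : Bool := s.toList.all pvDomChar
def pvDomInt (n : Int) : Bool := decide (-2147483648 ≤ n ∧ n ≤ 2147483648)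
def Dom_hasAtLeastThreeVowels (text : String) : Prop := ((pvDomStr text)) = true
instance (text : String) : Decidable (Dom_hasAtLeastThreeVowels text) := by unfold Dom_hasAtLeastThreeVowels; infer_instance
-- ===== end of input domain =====

-- B replaces A's character loop with an early-exit counter by summing text.count(v) over the five vowels (simpler, multi-pass).


-- ===== PORT A =====
-- the for-loop with its running counter and early return
def hasAtLeastThreeVowelsLoop : List Char → Nat → Bool
  | [], _ => false
  | c :: rest, vowel_count =>
    let vowel_count' :=
      if c = 'a' then vowel_count + 1
      else if c = 'e' then vowel_count + 1
      else if c = 'i' then vowel_count + 1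
      else if c = 'o' then vowel_count + 1
      else if c = 'u' then vowel_count + 1
      else vowel_count
    if vowel_count' ≥ 3 then true else hasAtLeastThreeVowelsLoop rest vowel_count'

def hasAtLeastThreeVowels (text : String) : Bool :=
  hasAtLeastThreeVowelsLoop text.toList 0

-- ===== PORT B =====
def hasAtLeastThreeVowels_alt (text : String) : Bool :=
  decide (3 ≤ (["a", "e", "i", "o", "u"].map (fun v => PySem.Str.count text v)).sum)

-- ===== PRECONDITION & SPEC =====
def Spec_hasAtLeastThreeVowels (text : String) (out : Bool) : Prop := out = hasAtLeastThreeVowels_alt text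
instance (text : String) (out : Bool) : Decidable (Spec_hasAtLeastThreeVowels text out) := by unfold Spec_hasAtLeastThreeVowels; infer_instance

-- ===== CLAIM (what is proved, stated in full; the proofs are below) =====
def Claim_equal_hasAtLeastThreeVowels : Prop := ∀ (text : String), Dom_hasAtLeastThreeVowels text → Spec_hasAtLeastThreeVowels text (hasAtLeastThreeVowels text)

-- ===== LEMMAS AND PROOFS =====

def pvIsVowel (c : Char) : Bool := c = 'a' || c = 'e' || c = 'i' || c = 'o' || c = 'u'

-- PySem.Chars.count with a single-character needle is List.count
theorem pvCountGo_single (c : Char) (fuel : Nat) (cs : List Char) (acc : Nat)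
    (h : cs.length ≤ fuel) : PySem.Chars.count.go [c] fuel cs acc = acc + cs.count c := by
  induction fuel generalizing cs acc with
  | zero =>
    cases cs with
    | nil => simp [PySem.Chars.count.go]
    | cons hd tl => simp at h
  | succ n ih =>
    cases cs with
    | nil => simp [PySem.Chars.count.go]
    | cons hd tl =>
      simp only [PySem.Chars.count.go]
      by_cases hc : hd = c
      · subst hc
        rw [if_pos (by simp [List.isPrefixOf])]
        simp only [List.length_cons] at h
        rw [ih _ _ (by simpa using h)]
        simp
        omega
      · have hc' : ¬ c = hd := fun h' => hc h'.symm
        rw [if_neg (by simp [List.isPrefixOf]; first | exact hc | exact hc')]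
        simp only [List.length_cons] at h
        rw [ih _ _ (by omega)]
        simp [hc]

theorem pvCount_single (cs : List Char) (c : Char) :
    PySem.Chars.count cs [c] = cs.count c := by
  have := pvCountGo_single c cs.length cs 0 le_rfl
  simp [PySem.Chars.count, this]

-- the five per-vowel counts sum to a single vowel countP
theorem pvSumCounts (cs : List Char) :
    cs.count 'a' + (cs.count 'e' + (cs.count 'i' + (cs.count 'o' + (cs.count 'u' + 0)))) =
      cs.countP pvIsVowel := by
  induction cs with
  | nil => simp
  | cons hd tl ih =>
    simp only [List.count_cons, List.countP_cons, pvIsVowel]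
    by_cases ha : hd = 'a' <;> by_cases he : hd = 'e' <;> by_cases hi : hd = 'i' <;>
      by_cases ho : hd = 'o' <;> by_cases hu : hd = 'u' <;>
      simp_all <;> omega

-- A's early-exit loop computes whether the total vowel count reaches 3
theorem pvLoopA (cs : List Char) (k : Nat) (hk : k < 3) :
    hasAtLeastThreeVowelsLoop cs k = decide (3 ≤ k + cs.countP pvIsVowel) := by
  induction cs generalizing k with
  | nil => simp [hasAtLeastThreeVowelsLoop]; omega
  | cons hd tl ih =>
    simp only [hasAtLeastThreeVowelsLoop, List.countP_cons, pvIsVowel]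
    by_cases ha : hd = 'a' <;> by_cases he : hd = 'e' <;> by_cases hi : hd = 'i' <;>
      by_cases ho : hd = 'o' <;> by_cases hu : hd = 'u' <;>
      simp_all <;>
      (by_cases h2 : 2 ≤ k
       · simp only [h2, decide_true, Bool.true_or]
         symm; rw [decide_eq_true_iff]; omega
       · simp only [Nat.not_le] at h2
         rw [ih (k + 1) (by omega)]
         have : ¬ (2 ≤ k) := by omega
         simp only [this, decide_false, Bool.false_or, decide_eq_decide]
         omega)

-- ===== VERDICT (by name: the statement is the Claim_ definition above) =====
theorem hasAtLeastThreeVowels_spec : Claim_equal_hasAtLeastThreeVowels := by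
  intro text _
  unfold Spec_hasAtLeastThreeVowels hasAtLeastThreeVowels hasAtLeastThreeVowels_alt
  rw [pvLoopA _ 0 (by omega)]
  simp only [List.map_cons, List.map_nil, List.sum_cons, List.sum_nil, PySem.Str.count,
    show ("a" : String).toList = ['a'] from rfl, show ("e" : String).toList = ['e'] from rfl,
    show ("i" : String).toList = ['i'] from rfl, show ("o" : String).toList = ['o'] from rfl,
    show ("u" : String).toList = ['u'] from rfl, pvCount_single]
  rw [decide_eq_decide, ← pvSumCounts]
  omega
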